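-- pv_equiv track=rewrite | github.com/speedfinger/codingtest_python_2nd | 7_que/17.py | solution
-- ===== SOURCE A (Python) =====
-- from collections import deque
--
-- def solution(cards1, cards2, goal):
--     answer = ''
--
--     card_1=deque(cards1)
--     card_2=deque(cards2)
--     goal_ = deque(goal)
--
--     word_1=None
--     word_2=None
--     context = None
--
--     while True:
--         if len(goal_)==0:
--             break
--
--         if word_1 is None and len(card_1)!=0:
--             word_1 = card_1.popleft()
--         if word_2 is None and len(card_2)!=0:
--             word_2 = card_2.popleft()
--
--         if context is None and len(goal_)!=0:
--             context = goal_.popleft()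
--
--
--         if context == word_1:
--
--             if word_1 is None:
--                 word_1=-1
--                 continue
--
--             context = None
--             word_1 = None
--
--         if context == word_2:
--             if word_2 is None:
--                 word_2=-1
--                 continue
--             context = None
--             word_2 = None
--
--         if context is not None:
--             # 이 코드를 안넣으면 TC에서 1개가 오답처리 됨
--             goal_.append("dummy")
--             break
--
--     return "Yes" if len(goal_)==0 else "No"
-- ===== SOURCE B (Python) =====
-- from collections import deque
--
-- def solution(cards1, cards2, goal):
--     card_1 = deque(cards1)
--     card_2 = deque(cards2)
--     for g in goal:
--         if card_1 and card_1[0] == g: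
--             card_1.popleft()
--         elif card_2 and card_2[0] == g:
--             card_2.popleft()
--         else:
--             return "No"
--     return "Yes"
-- ===== Notes on version B (the rewrite author's own statement) =====
-- stated objective: simpler
-- what changed: Replaces A's sentinel-driven while-True state machine (None/-1 markers, held popped words, a 'dummy' append to force the final test) with a single direct for-loop over goal that peeks at the two queue fronts and returns 'No' on the first mismatch.
import Mathlib
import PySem

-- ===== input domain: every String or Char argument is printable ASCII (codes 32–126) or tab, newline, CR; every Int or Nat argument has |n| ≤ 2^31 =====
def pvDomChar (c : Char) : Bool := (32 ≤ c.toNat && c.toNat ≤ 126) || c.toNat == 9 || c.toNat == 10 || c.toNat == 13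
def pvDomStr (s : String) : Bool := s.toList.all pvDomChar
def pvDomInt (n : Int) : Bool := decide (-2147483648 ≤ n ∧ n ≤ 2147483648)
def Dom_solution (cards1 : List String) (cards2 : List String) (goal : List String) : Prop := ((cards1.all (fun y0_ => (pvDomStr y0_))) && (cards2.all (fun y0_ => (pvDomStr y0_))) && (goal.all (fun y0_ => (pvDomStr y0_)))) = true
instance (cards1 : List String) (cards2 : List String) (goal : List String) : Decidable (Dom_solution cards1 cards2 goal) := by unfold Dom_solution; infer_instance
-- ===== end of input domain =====

-- B simplifies A's sentinel state machine into one direct pass over goal; same greedy result.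
-- ===== PORT A =====
-- Python value held in word_1/word_2: None, the sentinel -1, or a card string.
inductive PyVal
  | none
  | negOne
  | str (s : String)
deriving DecidableEq, Repr

-- Python '==' between context (None or a popped goal string) and a word value.
def pyEqCtx : Option String → PyVal → Bool
  | Option.none, PyVal.none => true
  | some s, PyVal.str t => s == t
  | _, _ => false

-- the two identical 'if word is None and deque non-empty: word = deque.popleft()' statements
def popA : PyVal → List String → PyVal × List String
  | PyVal.none, x :: xs => (PyVal.str x, xs)
  | w, c => (w, c)

-- A's while-True loop. context is None at the start of every iteration: it is None
-- initially, and on every path that reaches the next iteration A has reset it to None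
-- (the 'word_1 = -1; continue' branch, which would keep a non-None context, is dead
-- code: 'context == word_1' with 'word_1 is None' forces context = None, but context
-- was just popped from a non-empty goal_). So the loop recurses on the goal list.
def solGo : List String → List String → List String → PyVal → PyVal → String
  | _, _, [], _, _ => "Yes"          -- break with goal_ empty → "Yes"
  | c1, c2, gx :: gs, w1, w2 =>
    let p1 := popA w1 c1             -- maybe pop word_1 from card_1
    let p2 := popA w2 c2             -- maybe pop word_2 from card_2
    -- context = goal_.popleft()  (context was None, goal_ non-empty)
    if pyEqCtx (some gx) p1.1 then
      -- word_1 matched (it is a string, so A's inner 'word_1 is None' test is false);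
      -- context := None, word_1 := None; then A tests 'context == word_2' with context None:
      if pyEqCtx Option.none p2.1 then
        -- word_2 is None → A sets word_2 = -1 and continues (context is None)
        solGo p1.2 p2.2 gs PyVal.none PyVal.negOne
      else
        solGo p1.2 p2.2 gs PyVal.none p2.1
    else if pyEqCtx (some gx) p2.1 then
      -- word_2 matched (a string): context := None, word_2 := None; next iteration
      solGo p1.2 p2.2 gs p1.1 PyVal.none
    else
      -- context is not None: goal_.append "dummy"; break → goal_ non-empty → "No"
      "No"

def solution (cards1 : List String) (cards2 : List String) (goal : List String) : String :=
  solGo cards1 cards2 goal PyVal.none PyVal.none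

-- ===== PORT B =====
-- for g in goal: pop the front of card_1 if it equals g, else of card_2, else "No"
def solAltGo : List String → List String → List String → String
  | _, _, [] => "Yes"
  | c1, c2, x :: gs =>
    if c1.head? = some x then solAltGo c1.tail c2 gs
    else if c2.head? = some x then solAltGo c1 c2.tail gs
    else "No"

def solution_alt (cards1 : List String) (cards2 : List String) (goal : List String) : String :=
  solAltGo cards1 cards2 goal

-- ===== PRECONDITION & SPEC =====
def Spec_solution (cards1 : List String) (cards2 : List String) (goal : List String) (out : String) : Prop := out = solution_alt cards1 cards2 goal
instance (cards1 : List String) (cards2 : List String) (goal : List String) (out : String) : Decidable (Spec_solution cards1 cards2 goal out) := by unfold Spec_solution; infer_instance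

-- ===== CLAIM (what is proved, stated in full; the proofs are below) =====
def Claim_equal_solution : Prop := ∀ (cards1 : List String) (cards2 : List String) (goal : List String), Dom_solution cards1 cards2 goal → Spec_solution cards1 cards2 goal (solution cards1 cards2 goal)

-- ===== LEMMAS AND PROOFS =====
-- A's held word plus its remaining deque, seen as B's whole queue.
def restore : PyVal → List String → List String
  | PyVal.none, c => c
  | PyVal.negOne, c => c
  | PyVal.str s, c => s :: c

lemma restore_none (c : List String) : restore PyVal.none c = c := rfl
lemma restore_negOne (c : List String) : restore PyVal.negOne c = c := rfl

lemma restore_popA (w : PyVal) (c : List String) :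
    restore (popA w c).1 (popA w c).2 = restore w c := by
  cases w <;> cases c <;> rfl

lemma popA_match_iff (w : PyVal) (c : List String) (gx : String)
    (h : w = PyVal.negOne → c = []) :
    (pyEqCtx (some gx) (popA w c).1 = true) ↔ (restore w c).head? = some gx := by
  cases w <;> cases c <;> simp_all [popA, pyEqCtx, restore] <;> exact eq_comm

lemma popA_tail (w : PyVal) (c : List String) (gx : String)
    (h : pyEqCtx (some gx) (popA w c).1 = true) :
    (popA w c).2 = (restore w c).tail := by
  cases w <;> cases c <;> simp_all [popA, pyEqCtx, restore]

lemma popA_noneEq (w : PyVal) (c : List String) :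
    (pyEqCtx Option.none (popA w c).1 = true) ↔ (w = PyVal.none ∧ c = []) := by
  cases w <;> cases c <;> simp [popA, pyEqCtx]

lemma popA_good (w : PyVal) (c : List String)
    (h : w = PyVal.none ∨ ∃ s, w = PyVal.str s) :
    (popA w c).1 = PyVal.none ∨ ∃ s, (popA w c).1 = PyVal.str s := by
  rcases h with h | ⟨s, h⟩ <;> subst h <;> cases c <;> simp [popA]

lemma popA_inv (w : PyVal) (c : List String)
    (h : w = PyVal.negOne → c = []) :
    (popA w c).1 = PyVal.negOne → (popA w c).2 = [] := by
  cases w <;> cases c <;> simp_all [popA]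

lemma solGo_eq_alt (g : List String) : ∀ (c1 c2 : List String) (w1 w2 : PyVal),
    (w1 = PyVal.none ∨ ∃ s, w1 = PyVal.str s) →
    (w2 = PyVal.negOne → c2 = []) →
    solGo c1 c2 g w1 w2 = solAltGo (restore w1 c1) (restore w2 c2) g := by
  induction g with
  | nil => intro c1 c2 w1 w2 _ _; rfl
  | cons gx gs ih =>
    intro c1 c2 w1 w2 h1 h2
    have h1' : w1 = PyVal.negOne → c1 = [] := by
      rcases h1 with h | ⟨s, h⟩ <;> subst h <;> intro h <;> cases h
    by_cases hm1 : (restore w1 c1).head? = some gx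
    · -- card_1's front matches gx
      have hc1 : pyEqCtx (some gx) (popA w1 c1).1 = true :=
        (popA_match_iff w1 c1 gx h1').mpr hm1
      by_cases hn2 : pyEqCtx Option.none (popA w2 c2).1 = true
      · -- word_2 is None and card_2 empty: A sets word_2 := -1
        obtain ⟨hw2, hc2eq⟩ := (popA_noneEq w2 c2).mp hn2
        subst hw2; subst hc2eq
        simp only [solGo]
        rw [if_pos hc1, if_pos hn2]
        rw [show (popA PyVal.none ([] : List String)).2 = [] from rfl]
        rw [ih _ _ _ _ (Or.inl rfl) (fun _ => rfl)]
        rw [popA_tail w1 c1 gx hc1]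
        simp only [restore_none, restore_negOne, solAltGo]
        rw [if_pos hm1]
      · simp only [solGo]
        rw [if_pos hc1, if_neg hn2]
        rw [ih _ _ _ _ (Or.inl rfl) (popA_inv w2 c2 h2)]
        rw [restore_popA w2 c2, popA_tail w1 c1 gx hc1]
        simp only [restore_none, solAltGo]
        rw [if_pos hm1]
    · -- card_1's front does not match
      have hc1 : ¬ pyEqCtx (some gx) (popA w1 c1).1 = true := by
        rw [popA_match_iff w1 c1 gx h1']; exact hm1
      by_cases hm2 : (restore w2 c2).head? = some gx
      · have hc2 : pyEqCtx (some gx) (popA w2 c2).1 = true :=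
          (popA_match_iff w2 c2 gx h2).mpr hm2
        simp only [solGo]
        rw [if_neg hc1, if_pos hc2]
        rw [ih _ _ _ _ (popA_good w1 c1 h1) (by intro h; exact absurd h (by decide))]
        rw [restore_popA w1 c1, popA_tail w2 c2 gx hc2]
        simp only [restore_none, solAltGo]
        rw [if_neg hm1, if_pos hm2]
      · have hc2 : ¬ pyEqCtx (some gx) (popA w2 c2).1 = true := by
          rw [popA_match_iff w2 c2 gx h2]; exact hm2
        simp only [solGo]
        rw [if_neg hc1, if_neg hc2]
        simp only [solAltGo]
        rw [if_neg hm1, if_neg hm2]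

-- ===== VERDICT (by name: the statement is the Claim_ definition above) =====
theorem solution_spec : Claim_equal_solution := by
  intro c1 c2 g _
  unfold Spec_solution solution solution_alt
  exact solGo_eq_alt g c1 c2 PyVal.none PyVal.none (Or.inl rfl) (by simp)
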